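-- pv_equiv track=rewrite | github.com/hammarie/dpt2 | scripts/mpx_dpcr/blast_check.py | _mismatches_last_n
-- ===== SOURCE A (Python) =====
-- def _mismatches_last_n(qseq: str, sseq: str, n: int) -> int:
--     """Count mismatches within the last `n` query bases (3' end)."""
--     qseq = qseq.upper()
--     sseq = sseq.upper()
--     count = 0
--     considered = 0
--     idx = len(qseq) - 1
--     while idx >= 0 and considered < n:
--         q_base = qseq[idx]
--         s_base = sseq[idx] if idx < len(sseq) else "-"
--         if q_base != "-":
--             considered += 1
--             if s_base == "-" or q_base != s_base:
--                 count += 1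
--         idx -= 1
--     return count
-- ===== SOURCE B (Python) =====
-- def _mismatches_last_n(qseq: str, sseq: str, n: int) -> int:
--     """Count mismatches within the last `n` query bases (3' end)."""
--     qseq = qseq.upper()
--     sseq = sseq.upper()
--     positions = [i for i in range(len(qseq)) if qseq[i] != "-"]
--     tail = positions[-n:] if n > 0 else []
--     count = 0
--     for i in tail:
--         s_base = sseq[i] if i < len(sseq) else "-"
--         if s_base == "-" or qseq[i] != s_base:
--             count += 1
--     return count
-- ===== Notes on version B (the rewrite author's own statement) =====
-- stated objective: simpler
-- what changed: Replaces A's single backward while-loop that interleaves counting considered bases with mismatch testing by a two-phase forward decomposition: first collect all non-gap query indices, then slice off the last n and scan that tail counting mismatches.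
import Mathlib
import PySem

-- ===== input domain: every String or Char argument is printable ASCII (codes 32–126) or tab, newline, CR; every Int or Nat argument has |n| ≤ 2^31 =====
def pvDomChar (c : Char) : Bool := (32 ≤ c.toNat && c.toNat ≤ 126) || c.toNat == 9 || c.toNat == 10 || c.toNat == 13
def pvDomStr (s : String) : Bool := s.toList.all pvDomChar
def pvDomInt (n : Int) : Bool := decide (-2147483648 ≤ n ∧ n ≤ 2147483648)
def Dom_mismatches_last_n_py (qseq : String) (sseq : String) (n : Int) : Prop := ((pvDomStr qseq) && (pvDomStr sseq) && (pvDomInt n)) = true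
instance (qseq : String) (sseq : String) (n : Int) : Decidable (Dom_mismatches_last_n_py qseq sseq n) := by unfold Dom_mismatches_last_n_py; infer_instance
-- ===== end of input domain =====

-- B replaces A's backward counting while-loop by a forward collect-positions / slice-last-n /
-- scan-tail decomposition; same cost, simpler shape (objective: simpler). Return value only; no mutation.

-- ===== PORT A =====
-- while idx >= 0 and considered < n: …  (fuel = idx+1; idx is always in range of qs, so
-- qseq[idx] is ported exactly by getD with default never used)
def pvLoopA (qs ss : List Char) (n : Int) : Nat → Int → Int → Int
  | 0, _, count => count
  | i + 1, considered, count =>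
    if considered < n then
      let q := qs.getD i '-'
      let s := if i < ss.length then ss.getD i '-' else '-'
      if q ≠ '-' then
        pvLoopA qs ss n i (considered + 1) (if s = '-' ∨ q ≠ s then count + 1 else count)
      else
        pvLoopA qs ss n i considered count
    else count

def mismatches_last_n_py (qseq : String) (sseq : String) (n : Int) : Int :=
  let qs := PySem.Chars.upper qseq.toList
  let ss := PySem.Chars.upper sseq.toList
  pvLoopA qs ss n qs.length 0 0

-- ===== PORT B =====
-- positions = [i for i in range(len(qseq)) if qseq[i] != '-']  (i in range, so getD is exact)
-- tail = positions[-n:] if n > 0 else []   (PySem.List.slice is Python's slice)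
def mismatches_last_n_py_alt (qseq : String) (sseq : String) (n : Int) : Int :=
  let qs := PySem.Chars.upper qseq.toList
  let ss := PySem.Chars.upper sseq.toList
  let positions := (List.range qs.length).filter (fun i => qs.getD i '-' ≠ '-')
  let tail := if n > 0 then PySem.List.slice positions (some (-n)) none else []
  tail.foldl (fun count i =>
    let s := if i < ss.length then ss.getD i '-' else '-'
    if s = '-' ∨ qs.getD i '-' ≠ s then count + 1 else count) 0

-- ===== PRECONDITION & SPEC =====
def Spec_mismatches_last_n_py (qseq : String) (sseq : String) (n : Int) (out : Int) : Prop := out = mismatches_last_n_py_alt qseq sseq n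
instance (qseq : String) (sseq : String) (n : Int) (out : Int) : Decidable (Spec_mismatches_last_n_py qseq sseq n out) := by unfold Spec_mismatches_last_n_py; infer_instance

-- ===== CLAIM (what is proved, stated in full; the proofs are below) =====
def Claim_equal_mismatches_last_n_py : Prop := ∀ (qseq : String) (sseq : String) (n : Int), Dom_mismatches_last_n_py qseq sseq n → Spec_mismatches_last_n_py qseq sseq n (mismatches_last_n_py qseq sseq n)

-- ===== LEMMAS AND PROOFS =====

-- 0/1 mismatch indicator at a query index
def pvMism (qs ss : List Char) (i : Nat) : Int :=
  let s := if i < ss.length then ss.getD i '-' else '-'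
  if s = '-' ∨ qs.getD i '-' ≠ s then 1 else 0

-- non-gap query positions below i
def pvPos (qs : List Char) (i : Nat) : List Nat :=
  (List.range i).filter (fun j => qs.getD j '-' ≠ '-')

theorem pvPos_succ (qs : List Char) (i : Nat) :
    pvPos qs (i + 1) = pvPos qs i ++ (if qs.getD i '-' ≠ '-' then [i] else []) := by
  simp [pvPos, List.range_succ, List.filter_append]
  split_ifs <;> simp_all

theorem pvFoldl_eq_sum (qs ss : List Char) (l : List Nat) (c : Int) :
    l.foldl (fun count i =>
      let s := if i < ss.length then ss.getD i '-' else '-'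
      if s = '-' ∨ qs.getD i '-' ≠ s then count + 1 else count) c
    = c + (l.map (pvMism qs ss)).sum := by
  induction l generalizing c with
  | nil => simp
  | cons x xs ih =>
    simp only [List.foldl_cons, List.map_cons, List.sum_cons, ih]
    simp only [pvMism]
    split_ifs <;> ring

theorem pvLoopA_eq (qs ss : List Char) (n : Int) (i : Nat) :
    ∀ (considered count : Int),
      pvLoopA qs ss n i considered count
        = count + (((pvPos qs i).reverse.take (n - considered).toNat).map (pvMism qs ss)).sum := by
  induction i with
  | zero => intro considered count; simp [pvLoopA, pvPos]
  | succ i ih =>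
    intro considered count
    rw [pvLoopA]
    by_cases h : considered < n
    · rw [pvPos_succ]
      by_cases hq : qs.getD i '-' ≠ '-'
      · simp only [if_pos h, if_pos hq, List.reverse_append, List.reverse_cons,
          List.reverse_nil, List.nil_append, List.cons_append]
        have hk : (n - considered).toNat = (n - (considered + 1)).toNat + 1 := by omega
        rw [hk, List.take_succ_cons, List.map_cons, List.sum_cons, ih]
        simp only [pvMism]
        split_ifs <;> ring
      · simp only [if_pos h, ih, hq]
        simp
    · rw [if_neg h]
      have : (n - considered).toNat = 0 := by omega
      simp [this]

theorem pvTake_reverse (l : List Nat) (k : Nat) :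
    l.reverse.take k = (l.drop (l.length - k)).reverse := by
  by_cases h : k ≤ l.length
  · rw [List.take_reverse]
  · rw [List.take_of_length_le (by simp; omega)]
    have : l.length - k = 0 := by omega
    simp [this]

-- ===== VERDICT (by name: the statement is the Claim_ definition above) =====
theorem mismatches_last_n_py_spec : Claim_equal_mismatches_last_n_py := by
  intro qseq sseq n _
  show _ = _
  unfold mismatches_last_n_py mismatches_last_n_py_alt
  simp only []
  set qs := PySem.Chars.upper qseq.toList with hqs
  set ss := PySem.Chars.upper sseq.toList with hss
  rw [pvLoopA_eq]
  rw [show (List.range qs.length).filter (fun j => qs.getD j '-' ≠ '-') = pvPos qs qs.length from rfl]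
  by_cases hn : n > 0
  · rw [if_pos hn]
    have hslice : PySem.List.slice (pvPos qs qs.length) (some (-n)) none
        = (pvPos qs qs.length).drop ((pvPos qs qs.length).length - n.toNat) := by
      have hcast : -n = -((n.toNat : Int)) := by omega
      rw [hcast, PySem.List.slice_from_neg_natCast _ n.toNat (by omega)]
    rw [hslice, pvFoldl_eq_sum]
    rw [show (n : Int) - 0 = n from by ring, pvTake_reverse]
    simp [List.sum_reverse]
  · rw [if_neg hn]
    have h0 : n.toNat = 0 := by omega
    simp [h0]
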